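-- pv_equiv track=rewrite | github.com/Pella86/PellaScreamBot | src/UnicodeFonts.py | double_struck
-- ===== SOURCE A (Python) =====
-- import string
--
-- def double_struck(text):
--
--     # alphabet
--     start = 0x1D538
--
--     capitals = string.ascii_uppercase
--     lowers = string.ascii_lowercase
--     alphabet = capitals + lowers
--
--
--     exceptions = "CHNPQRZ"
--     symbols = "\u2102\u210D\u2115\u2119\u211A\u211D\u2124"
--
--     exp_sym = dict(zip(list(exceptions), list(symbols)))
--
--     ascii_to_doublestruck = {}
--
--     for l in alphabet:
--         if l in exp_sym:
--             ascii_to_doublestruck[l] = exp_sym[l]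
--         else:
--             ascii_to_doublestruck[l] = chr(start)
--         start += 1
--
--     # digits
--     start = 0x1D7D8
--     for l in string.digits:
--         ascii_to_doublestruck[l] = chr(start)
--         start += 1
--
--     # string building
--     s = ""
--     for l in text:
--         try:
--             s += ascii_to_doublestruck[l]
--         except KeyError:
--             s += l
--
--     return s
-- ===== SOURCE B (Python) =====
-- def double_struck(text):
--     exceptions = {'C': '\u2102', 'H': '\u210D', 'N': '\u2115', 'P': '\u2119',
--                   'Q': '\u211A', 'R': '\u211D', 'Z': '\u2124'}
--     out = []
--     for c in text:
--         if 'A' <= c <= 'Z':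
--             out.append(exceptions.get(c, chr(0x1D538 + ord(c) - ord('A'))))
--         elif 'a' <= c <= 'z':
--             out.append(chr(0x1D538 + 26 + ord(c) - ord('a')))
--         elif '0' <= c <= '9':
--             out.append(chr(0x1D7D8 + ord(c) - ord('0')))
--         else:
--             out.append(c)
--     return ''.join(out)
-- ===== Notes on version B (the rewrite author's own statement) =====
-- stated objective: simpler
-- what changed: B drops A's precomputed 72-entry translation table and instead dispatches per character by class, computing the double-struck code point arithmetically from the character's ordinal, with only a 7-entry exceptions map for the named letterlike symbols.
import Mathlib
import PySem

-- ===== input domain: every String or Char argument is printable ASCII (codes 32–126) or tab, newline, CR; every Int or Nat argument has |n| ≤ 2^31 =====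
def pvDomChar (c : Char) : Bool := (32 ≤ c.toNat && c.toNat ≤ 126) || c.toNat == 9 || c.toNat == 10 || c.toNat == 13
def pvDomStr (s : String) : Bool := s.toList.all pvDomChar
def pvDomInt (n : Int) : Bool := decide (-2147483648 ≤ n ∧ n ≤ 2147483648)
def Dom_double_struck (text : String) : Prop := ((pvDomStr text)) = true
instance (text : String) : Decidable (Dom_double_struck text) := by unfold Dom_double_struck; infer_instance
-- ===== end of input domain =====

-- B replaces A's precomputed 72-entry table with per-character arithmetic on the code point
-- plus a 7-entry exceptions map (objective: simpler). Return-value equivalence only.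

-- ===== PORT A =====
-- dict(zip(exceptions, symbols))
def dsExpSym : PySem.Dict Char Char :=
  PySem.Dict.ofList (("CHNPQRZ".toList).zip ("\u2102\u210D\u2115\u2119\u211A\u211D\u2124".toList))

-- the two table-building loops of A (state: dict so far, running code point `start`)
def dsTable : PySem.Dict Char Char :=
  let alphabet := "ABCDEFGHIJKLMNOPQRSTUVWXYZ".toList ++ "abcdefghijklmnopqrstuvwxyz".toList
  let st := alphabet.foldl (fun (st : PySem.Dict Char Char × Nat) l =>
      (match dsExpSym.get? l with
       | some v => st.1.insert l v
       | none   => st.1.insert l (Char.ofNat st.2), st.2 + 1))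
    (PySem.Dict.empty, 0x1D538)
  let st2 := ("0123456789".toList).foldl (fun (st : PySem.Dict Char Char × Nat) l =>
      (st.1.insert l (Char.ofNat st.2), st.2 + 1)) (st.1, 0x1D7D8)
  st2.1

def double_struck (text : String) : String :=
  -- string-building loop; try/except KeyError ported as a match on get?
  String.ofList (text.toList.foldl (fun s l =>
    match dsTable.get? l with
    | some v => s ++ [v]
    | none   => s ++ [l]) [])

-- ===== PORT B =====
def dsExceptions : PySem.Dict Char Char :=
  PySem.Dict.ofList [('C', 'ℂ'), ('H', 'ℍ'), ('N', 'ℕ'), ('P', 'ℙ'), ('Q', 'ℚ'), ('R', 'ℝ'), ('Z', 'ℤ')]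

def dsCharAlt (c : Char) : Char :=
  if 'A' ≤ c ∧ c ≤ 'Z' then
    (dsExceptions.getD c (Char.ofNat (0x1D538 + c.toNat - 'A'.toNat)))
  else if 'a' ≤ c ∧ c ≤ 'z' then
    Char.ofNat (0x1D538 + 26 + c.toNat - 'a'.toNat)
  else if '0' ≤ c ∧ c ≤ '9' then
    Char.ofNat (0x1D7D8 + c.toNat - '0'.toNat)
  else c

def double_struck_alt (text : String) : String :=
  String.ofList (text.toList.map dsCharAlt)

-- ===== PRECONDITION & SPEC =====
def Spec_double_struck (text : String) (out : String) : Prop := out = double_struck_alt text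
instance (text : String) (out : String) : Decidable (Spec_double_struck text out) := by unfold Spec_double_struck; infer_instance

-- ===== CLAIM (what is proved, stated in full; the proofs are below) =====
def Claim_equal_double_struck : Prop := ∀ (text : String), Dom_double_struck text → Spec_double_struck text (double_struck text)

-- ===== LEMMAS AND PROOFS =====

-- A's per-character result
def dsCharA (c : Char) : Char :=
  match dsTable.get? c with
  | some v => v
  | none   => c

-- the value of A's two table-building loops, as a literal (one kernel evaluation)
def dsTableLit : PySem.Dict Char Char := PySem.Dict.mk [('A', '𝔸'), ('B', '𝔹'), ('C', 'ℂ'), ('D', '𝔻'), ('E', '𝔼'), ('F', '𝔽'), ('G', '𝔾'), ('H', 'ℍ'), ('I', '𝕀'), ('J', '𝕁'), ('K', '𝕂'), ('L', '𝕃'), ('M', '𝕄'), ('N', 'ℕ'), ('O', '𝕆'), ('P', 'ℙ'), ('Q', 'ℚ'), ('R', 'ℝ'), ('S', '𝕊'), ('T', '𝕋'), ('U', '𝕌'), ('V', '𝕍'), ('W', '𝕎'), ('X', '𝕏'), ('Y', '𝕐'), ('Z', 'ℤ'), ('a', '𝕒'), ('b', '𝕓'), ('c', '𝕔'), ('d',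 '𝕕'), ('e', '𝕖'), ('f', '𝕗'), ('g', '𝕘'), ('h', '𝕙'), ('i', '𝕚'), ('j', '𝕛'), ('k', '𝕜'), ('l', '𝕝'), ('m', '𝕞'), ('n', '𝕟'), ('o', '𝕠'), ('p', '𝕡'), ('q', '𝕢'), ('r', '𝕣'), ('s', '𝕤'), ('t', '𝕥'), ('u', '𝕦'), ('v', '𝕧'), ('w', '𝕨'), ('x', '𝕩'), ('y', '𝕪'), ('z', '𝕫'), ('0', '𝟘'), ('1', '𝟙'), ('2', '𝟚'), ('3', '𝟛'), ('4', '𝟜'), ('5', '𝟝'), ('6', '𝟞'), ('7', '𝟟'), ('8', '𝟠'), ('9', '𝟡')]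

def dsCharA' (c : Char) : Char :=
  match dsTableLit.get? c with
  | some v => v
  | none   => c

set_option maxRecDepth 4000 in
theorem dsTable_eq : dsTable = dsTableLit := by decide

theorem dsCharA_eq (c : Char) : dsCharA c = dsCharA' c := by
  unfold dsCharA dsCharA'; rw [dsTable_eq]

set_option maxRecDepth 100000 in
theorem dsChar_eq_of_lt (n : Nat) (h : n < 127) : dsCharA' (Char.ofNat n) = dsCharAlt (Char.ofNat n) := by
  revert h; revert n; decide

theorem dsChar_eq (c : Char) (h : pvDomChar c = true) : dsCharA c = dsCharAlt c := by
  have hn : c.toNat < 127 := by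
    simp [pvDomChar] at h; omega
  have := dsChar_eq_of_lt c.toNat hn
  rw [Char.ofNat_toNat] at this
  rw [dsCharA_eq]; exact this

theorem double_struck_foldl (cs : List Char) :
    cs.foldl (fun s l =>
      match dsTable.get? l with
      | some v => s ++ [v]
      | none   => s ++ [l]) [] = cs.map dsCharA := by
  have : ∀ (s l), (match dsTable.get? l with
      | some v => s ++ [v]
      | none   => s ++ [l]) = s ++ [dsCharA l] := by
    intro s l; unfold dsCharA; cases dsTable.get? l <;> rfl
  simp only [this]
  simpa using PySem.List.foldl_append_singleton_eq_map dsCharA cs []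

-- ===== VERDICT (by name: the statement is the Claim_ definition above) =====
set_option maxRecDepth 100000 in
theorem double_struck_spec : Claim_equal_double_struck := by
  intro text hdom
  unfold Spec_double_struck double_struck double_struck_alt
  rw [double_struck_foldl]
  congr 1
  apply List.map_congr_left
  intro c hc
  apply dsChar_eq
  exact List.all_eq_true.mp hdom c hc
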